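-- pv_equiv track=rewrite | github.com/seungjun-green/Google-KickStart_B | 2021/Round-B/Increasing Substring..py | solution
-- ===== SOURCE A (Python) =====
-- def solution(S):
--     ans = ""
--
--     for i in range(len(S)):
--         count = 1
--         res = ''
--         for j in range(i, -1, -1):
--             if j == 0:
--                 break
--             elif ord(S[j]) > ord(S[j-1]):
--                 count += 1
--             else:
--                 break
--
--         ans += str(count)
--         ans += " "
--
--     return ans
-- ===== SOURCE B (Python) =====
-- def solution(S):
--     out = []
--     count = 0
--     prev = None
--     for c in S:
--         count = count + 1 if prev is not None and prev < c else 1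
--         out.append(str(count))
--         out.append(" ")
--         prev = c
--     return "".join(out)
-- ===== Notes on version B (the rewrite author's own statement) =====
-- stated objective: faster
-- what changed: Replaces the per-index backward rescan (nested loop) with a single forward pass that carries the previous run length (count = count+1 if previous char < current else 1), joining the pieces at the end.
import Mathlib
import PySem

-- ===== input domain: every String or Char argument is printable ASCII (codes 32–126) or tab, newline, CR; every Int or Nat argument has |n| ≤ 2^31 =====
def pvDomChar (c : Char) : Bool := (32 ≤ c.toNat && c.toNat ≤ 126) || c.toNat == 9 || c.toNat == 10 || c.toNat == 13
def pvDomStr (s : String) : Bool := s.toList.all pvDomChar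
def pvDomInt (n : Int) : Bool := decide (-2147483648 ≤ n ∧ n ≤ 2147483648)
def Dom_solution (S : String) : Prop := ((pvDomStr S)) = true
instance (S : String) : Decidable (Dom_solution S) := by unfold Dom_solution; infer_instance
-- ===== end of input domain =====

-- B replaces A's per-index backward rescan with one forward pass carrying the previous
-- run length; same output for every string.

-- ===== PORT A =====
-- inner loop 'for j in range(i, -1, -1)': j counts down; breaks at j == 0 or when not increasing.
-- S[j] with 0 ≤ j < len(S) is ported as l.getD j ' ' (index always in range here, so exact);
-- 'ord(S[j]) > ord(S[j-1])' is the codepoint comparison, ported via Char.toNat.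
def solInner (l : List Char) : Nat → Int → Int
  | 0, count => count
  | j+1, count =>
    if (l.getD j ' ').toNat < (l.getD (j+1) ' ').toNat then solInner l j (count + 1)
    else count

def solution (S : String) : String :=
  let l := S.toList
  (List.range l.length).foldl (fun ans i => ans ++ PySem.Int.toStr (solInner l i 1) ++ " ") ""

-- ===== PORT B =====
-- loop body of Source B; state = (accumulated output, previous count, previous char or none)
def altStep (st : String × Int × Option Char) (c : Char) : String × Int × Option Char :=
  let count : Int :=
    match st.2.2 with
    | some p => if p.toNat < c.toNat then st.2.1 + 1 else 1
    | none => 1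
  (st.1 ++ PySem.Int.toStr count ++ " ", count, some c)

def solution_alt (S : String) : String :=
  (S.toList.foldl altStep ("", 0, none)).1

-- ===== PRECONDITION & SPEC =====
def Spec_solution (S : String) (out : String) : Prop := out = solution_alt S
instance (S : String) (out : String) : Decidable (Spec_solution S out) := by unfold Spec_solution; infer_instance

-- ===== CLAIM (what is proved, stated in full; the proofs are below) =====
def Claim_equal_solution : Prop := ∀ (S : String), Dom_solution S → Spec_solution S (solution S)

-- ===== LEMMAS AND PROOFS =====

-- run length of the strictly increasing run of l ending at index i
def runCnt (l : List Char) : Nat → Int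
  | 0 => 1
  | i+1 => if (l.getD i ' ').toNat < (l.getD (i+1) ' ').toNat then runCnt l i + 1 else 1

def piece (l : List Char) (i : Nat) : String := PySem.Int.toStr (runCnt l i) ++ " "

-- output for the index block [i, i+n)
def outFrom (l : List Char) (i n : Nat) : String :=
  (List.range' i n).foldr (fun k s => piece l k ++ s) ""

theorem outFrom_succ (l : List Char) (i n : Nat) :
    outFrom l i (n+1) = piece l i ++ outFrom l (i+1) n := by
  rw [outFrom, List.range'_succ]; rfl

theorem solInner_acc (l : List Char) (j : Nat) (c : Int) :
    solInner l j (c + 1) = solInner l j c + 1 := by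
  induction j generalizing c with
  | zero => simp [solInner]
  | succ j ih =>
    simp only [solInner]
    split <;> simp [ih]

theorem solInner_eq (l : List Char) (i : Nat) : solInner l i 1 = runCnt l i := by
  induction i with
  | zero => simp [solInner, runCnt]
  | succ i ih =>
    simp only [solInner, runCnt]
    split
    · rw [show (1 : Int) + 1 = 1 + 1 from rfl, solInner_acc, ih]
    · rfl

theorem A_fold (l : List Char) (n i : Nat) (acc : String) :
    (List.range' i n).foldl (fun ans k => ans ++ PySem.Int.toStr (solInner l k 1) ++ " ") acc
      = acc ++ outFrom l i n := by
  induction n generalizing i acc with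
  | zero => simp [outFrom]
  | succ n ih =>
    rw [List.range'_succ]
    simp only [List.foldl_cons]
    rw [ih, outFrom_succ, ← String.append_assoc]
    congr 1
    simp [piece, solInner_eq, String.append_assoc]

theorem B_fold (l : List Char) (rest : List Char) (i : Nat) (acc : String)
    (hdrop : l.drop (i+1) = rest) :
    (rest.foldl altStep (acc, runCnt l i, some (l.getD i ' '))).1
      = acc ++ outFrom l (i+1) (l.length - (i+1)) := by
  induction rest generalizing i acc with
  | nil =>
    have hle : l.length ≤ i + 1 := by
      by_contra h
      have : l.drop (i+1) ≠ [] := by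
        simp [List.drop_eq_nil_iff]; omega
      exact this hdrop
    have hlen : l.length - (i+1) = 0 := by omega
    simp [hlen, outFrom]
  | cons d rest' ih =>
    have hi1 : i + 1 < l.length := by
      by_contra h
      have : l.drop (i+1) = [] := List.drop_eq_nil_of_le (by omega)
      rw [hdrop] at this; simp at this
    have hd : l.getD (i+1) ' ' = d := by
      have h0 : (l.drop (i+1))[0]? = some d := by rw [hdrop]; rfl
      rw [List.getElem?_drop] at h0
      simp [List.getD, h0]
    have hdrop' : l.drop (i+2) = rest' := by
      have h2 : l.drop (i+1+1) = (l.drop (i+1)).drop 1 := by rw [List.drop_drop]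
      rw [hdrop] at h2; simpa using h2
    have hcnt : (if (l.getD i ' ').toNat < d.toNat then runCnt l i + 1 else 1)
        = runCnt l (i+1) := by rw [runCnt, hd]
    have hstep : altStep (acc, runCnt l i, some (l.getD i ' ')) d
        = (acc ++ piece l (i+1), runCnt l (i+1), some (l.getD (i+1) ' ')) := by
      simp only [altStep, hd, hcnt, piece]
      rw [String.append_assoc]
    have hrng : l.length - (i+1) = (l.length - (i+2)) + 1 := by omega
    rw [List.foldl_cons, hstep, ih _ _ hdrop', hrng, outFrom_succ, String.append_assoc]

theorem both_eq (S : String) : solution S = solution_alt S := by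
  simp only [solution, solution_alt]
  rcases hl : S.toList with _ | ⟨c, rest⟩
  · rfl
  · rw [List.range_eq_range', A_fold]
    have hB := B_fold (c :: rest) rest 0 ("" ++ PySem.Int.toStr 1 ++ " ") rfl
    have hB' : ((c :: rest).foldl altStep ("", 0, none)).1
        = ("" ++ PySem.Int.toStr 1 ++ " ") ++ outFrom (c :: rest) 1 ((c :: rest).length - 1) :=
      hB
    rw [hB']
    have hlen : (c :: rest).length = rest.length + 1 := by simp
    rw [hlen]
    simp only [Nat.add_sub_cancel, outFrom_succ]
    simp [piece, runCnt, String.append_assoc]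

-- ===== VERDICT (by name: the statement is the Claim_ definition above) =====
theorem solution_spec : Claim_equal_solution := by
  intro S _
  unfold Spec_solution
  exact both_eq S
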